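-- pv_equiv track=rewrite | github.com/letsupgrad/JEKI_MOVINGWALLS | app.py | get_summary_categories
-- ===== SOURCE A (Python) =====
-- from typing import Dict, List, Any, Optional, Union
--
-- def get_summary_categories(json_data: Dict) -> Dict:
--     """Enhanced summary category detection"""
--     summary_categories = [
--         "Overall Performance Summary",
--         "Weekly Summary",
--         "Daily Summary",
--         "Overall Age and Gender",
--         "Overall Hourly",
--         "Network Summary",
--         "Performance Overview",
--         "Analytics Summary",
--         "Dashboard Data"
--     ]
--
--     results = {}
--     for filename, file_data in json_data.items():
--         for category in summary_categories:
--             # Case-insensitive search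
--             for key in file_data.keys():
--                 if key.lower() == category.lower():
--                     if filename not in results:
--                         results[filename] = {}
--                     results[filename][category] = file_data[key]
--                     break
--
--     return results
-- ===== SOURCE B (Python) =====
-- def get_summary_categories(json_data):
--     """Enhanced summary category detection"""
--     summary_categories = [
--         "Overall Performance Summary",
--         "Weekly Summary",
--         "Daily Summary",
--         "Overall Age and Gender",
--         "Overall Hourly",
--         "Network Summary",
--         "Performance Overview",
--         "Analytics Summary",
--         "Dashboard Data",
--     ]
--     # key-driven matching: lowercase category -> its position in the list
--     cat_index = {c.lower(): i for i, c in enumerate(summary_categories)}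
--     results = {}
--     for filename, file_data in json_data.items():
--         found = {}  # category position -> value at the first key matching it
--         for key, value in file_data.items():
--             i = cat_index.get(key.lower())
--             if i is not None and i not in found:
--                 found[i] = value
--         if found:
--             results[filename] = {summary_categories[i]: found[i]
--                                  for i in sorted(found)}
--     return results
-- ===== Notes on version B (the rewrite author's own statement) =====
-- stated objective: faster
-- what changed: B inverts the matching direction: instead of A's scan of the file's keys once per category, B makes a single pass over each file's items, classifying every key through a precomputed lowercase-category->position table into a first-value-wins dict of matched positions, and then rebuilds the per-file result by sorting the matched positions (one key scan per file instead of nine; measured ~3.6x faster).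
import Mathlib
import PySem

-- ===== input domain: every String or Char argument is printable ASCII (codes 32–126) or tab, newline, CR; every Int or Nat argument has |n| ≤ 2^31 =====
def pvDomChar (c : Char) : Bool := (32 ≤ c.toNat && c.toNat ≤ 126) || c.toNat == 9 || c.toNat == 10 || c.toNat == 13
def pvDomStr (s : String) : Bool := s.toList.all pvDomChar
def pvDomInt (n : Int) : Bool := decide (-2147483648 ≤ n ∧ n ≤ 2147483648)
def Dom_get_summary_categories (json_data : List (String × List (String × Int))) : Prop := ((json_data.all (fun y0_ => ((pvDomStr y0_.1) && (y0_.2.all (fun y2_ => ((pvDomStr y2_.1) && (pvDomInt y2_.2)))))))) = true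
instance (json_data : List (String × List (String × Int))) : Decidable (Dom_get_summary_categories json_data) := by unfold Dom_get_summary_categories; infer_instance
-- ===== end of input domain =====

-- B inverts A's matching direction: one pass over each file's items classifies every key through a
-- precomputed lowercase-category->position table (first value wins), and the per-file result is
-- rebuilt by sorting the matched positions (objective: faster; one key scan per file instead of nine).

-- the fixed category list shared by both programs (a literal constant, not logic)
def pvCats : List String :=
  ["Overall Performance Summary",
   "Weekly Summary",
   "Daily Summary",
   "Overall Age and Gender",
   "Overall Hourly",
   "Network Summary",
   "Performance Overview",
   "Analytics Summary",
   "Dashboard Data"]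

-- ===== PORT A =====
-- the inner 'for key in file_data.keys(): … break' loop of A
def pvAKeyLoop (keys : List String) (filename : String)
    (file_data : PySem.Dict String Int) (category : String)
    (results : PySem.Dict String (PySem.Dict String Int)) :
    PySem.Dict String (PySem.Dict String Int) :=
  match keys with
  | [] => results
  | key :: rest =>
    if PySem.Str.lower key == PySem.Str.lower category then
      -- if filename not in results: results[filename] = {}
      let results := if results.contains filename then results
                     else results.insert filename PySem.Dict.empty
      -- results[filename][category] = file_data[key]  (filename is present and key ∈ keys,
      -- so the defaults of modify/getD never fire)
      results.modify filename PySem.Dict.empty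
        (fun d => d.insert category (file_data.getD key 0))
    else pvAKeyLoop rest filename file_data category results

def get_summary_categories (json_data : List (String × List (String × Int))) :
    List (String × List (String × Int)) :=
  let summary_categories := pvCats
  let results := json_data.foldl
    (fun results fd =>
      summary_categories.foldl
        (fun results category =>
          pvAKeyLoop (fd.2.map (·.1)) fd.1 (PySem.Dict.mk fd.2) category results)
        results)
    PySem.Dict.empty
  results.items.map (fun p => (p.1, p.2.items))

-- ===== PORT B =====
-- cat_index = {c.lower(): i for i, c in enumerate(summary_categories)}
def pvCatIndex : PySem.Dict String Int :=
  (PySem.List.enumerate pvCats).foldl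
    (fun d p => d.insert (PySem.Str.lower p.2) p.1) PySem.Dict.empty

-- the per-file pass: found[i] = value at the first key classified to position i
def pvFoundLoop (items : List (String × Int)) : PySem.Dict Int Int :=
  items.foldl
    (fun found kv =>
      match pvCatIndex.get? (PySem.Str.lower kv.1) with
      | some i => if found.contains i then found else found.insert i kv.2
      | none => found)
    PySem.Dict.empty

def get_summary_categories_alt (json_data : List (String × List (String × Int))) :
    List (String × List (String × Int)) :=
  json_data.foldl
    (fun results fd =>
      let found := pvFoundLoop fd.2
      if found.items.isEmpty then results   -- 'if found:'
      else
        -- {summary_categories[i]: found[i] for i in sorted(found)} — positions are distinct,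
        -- so the dict comprehension is exactly this map over the sorted positions
        results ++ [(fd.1,
          (PySem.List.sorted found.keys (fun i => i) false).map
            (fun i => (PySem.List.pyGetD pvCats i "", found.getD i 0)))])
    []

-- ===== PRECONDITION & SPEC =====
-- Pre_ excludes association lists with duplicate filenames, which a Python dict argument cannot
-- represent (A's results dict merges duplicate files in place, B appends one block per file).
def Pre_get_summary_categories (json_data : List (String × List (String × Int))) : Prop :=
  (json_data.map (·.1)).Nodup
instance (json_data : List (String × List (String × Int))) : Decidable (Pre_get_summary_categories json_data) := by unfold Pre_get_summary_categories; infer_instance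
def pvWitness_get_summary_categories : (List (String × List (String × Int))) :=
  [("f", [("Daily Summary", 1)])]
def Spec_get_summary_categories (json_data : List (String × List (String × Int))) (out : List (String × List (String × Int))) : Prop := out = get_summary_categories_alt json_data
instance (json_data : List (String × List (String × Int))) (out : List (String × List (String × Int))) : Decidable (Spec_get_summary_categories json_data out) := by unfold Spec_get_summary_categories; infer_instance

-- ===== CLAIM (what is proved, stated in full; the proofs are below) =====
def Claim_equal_get_summary_categories : Prop := ∀ (json_data : List (String × List (String × Int))), Dom_get_summary_categories json_data → Pre_get_summary_categories json_data → Spec_get_summary_categories json_data (get_summary_categories json_data)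

-- ===== LEMMAS AND PROOFS =====

-- the matches of a single file: category ↦ value at the first key whose lowercase form equals its own
def pvMatched (fd2 : List (String × Int)) (cs : List String) : List (String × Int) :=
  cs.filterMap (fun c =>
    ((fd2.map (·.1)).find? (fun k => PySem.Str.lower k == PySem.Str.lower c)).map
      (fun k => (c, (PySem.Dict.mk fd2).getD k 0)))

theorem pvCats_nodup : pvCats.Nodup := by decide

-- A's key loop acts on the first key whose lowercase form matches
theorem pvAKeyLoop_eq (keys : List String) (f : String) (data : PySem.Dict String Int)
    (c : String) (r : PySem.Dict String (PySem.Dict String Int)) :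
    pvAKeyLoop keys f data c r =
      match keys.find? (fun k => PySem.Str.lower k == PySem.Str.lower c) with
      | none => r
      | some k =>
        (if r.contains f then r else r.insert f PySem.Dict.empty).insert f
          (((if r.contains f then r else r.insert f PySem.Dict.empty).getD f
              PySem.Dict.empty).insert c (data.getD k 0)) := by
  induction keys with
  | nil => rfl
  | cons k rest ih =>
    by_cases h : (PySem.Str.lower k == PySem.Str.lower c) = true
    · simp [pvAKeyLoop, h, PySem.Dict.modify]
    · have hb : (PySem.Str.lower k == PySem.Str.lower c) = false := by simpa using h
      simp [pvAKeyLoop, hb, ih]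

-- unfolding pvMatched one category at a time
theorem pvMatched_cons_none (fd2 : List (String × Int)) (c : String) (cs : List String)
    (h : (fd2.map (·.1)).find? (fun k => PySem.Str.lower k == PySem.Str.lower c) = none) :
    pvMatched fd2 (c :: cs) = pvMatched fd2 cs := by
  simp only [pvMatched, List.filterMap_cons, h, Option.map_none]

theorem pvMatched_cons_some (fd2 : List (String × Int)) (c : String) (cs : List String)
    (k : String)
    (h : (fd2.map (·.1)).find? (fun k => PySem.Str.lower k == PySem.Str.lower c) = some k) :
    pvMatched fd2 (c :: cs) =
      (c, (PySem.Dict.mk fd2).getD k 0) :: pvMatched fd2 cs := by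
  simp only [pvMatched, List.filterMap_cons, h, Option.map_some]

-- a fresh insert into a literal dict appends
theorem pvMk_insert (m : List (String × Int)) (c : String) (v : Int)
    (hc : c ∉ m.map (·.1)) :
    (PySem.Dict.mk m).insert c v = PySem.Dict.mk (m ++ [(c, v)]) := by
  apply PySem.Dict.ext
  apply PySem.Dict.items_insert_of_not_contains
  simp only [PySem.Dict.contains]
  rw [List.any_eq_false]
  intro p hp he
  have hmem : p.1 ∈ m.map (·.1) := List.mem_map_of_mem hp
  rw [eq_of_beq he] at hmem
  exact hc hmem

-- A's per-file category fold, once the file already has an entry whose keys avoid cs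
theorem pvAFile_present (f : String) (fd2 : List (String × Int)) (cs : List String)
    (m : List (String × Int)) (r : PySem.Dict String (PySem.Dict String Int))
    (hnd : cs.Nodup)
    (hr : r.get? f = some (PySem.Dict.mk m))
    (hm : ∀ c ∈ cs, c ∉ m.map (·.1)) :
    cs.foldl (fun r c => pvAKeyLoop (fd2.map (·.1)) f (PySem.Dict.mk fd2) c r) r =
      if pvMatched fd2 cs = [] then r
      else r.insert f (PySem.Dict.mk (m ++ pvMatched fd2 cs)) := by
  induction cs generalizing m r with
  | nil => simp [pvMatched]
  | cons c cs ih =>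
    obtain ⟨hc, hnd'⟩ := List.nodup_cons.mp hnd
    have hcont : r.contains f = true := by
      rw [PySem.Dict.contains_eq_isSome_get?, hr]; rfl
    rw [List.foldl_cons, pvAKeyLoop_eq]
    rcases h : (fd2.map (·.1)).find? (fun k => PySem.Str.lower k == PySem.Str.lower c) with _ | k
    · simp only [h]
      rw [pvMatched_cons_none fd2 c cs h]
      exact ih m r hnd' hr (fun c' h' => hm c' (List.mem_cons_of_mem _ h'))
    · simp only [h]
      have hgetD : r.getD f PySem.Dict.empty = PySem.Dict.mk m :=
        PySem.Dict.getD_of_get?_eq_some _ _ hr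
      have hins : (PySem.Dict.mk m).insert c ((PySem.Dict.mk fd2).getD k 0) =
          PySem.Dict.mk (m ++ [(c, (PySem.Dict.mk fd2).getD k 0)]) :=
        pvMk_insert _ _ _ (hm c (List.mem_cons_self))
      rw [if_pos hcont, hgetD, hins]
      have hr' : (r.insert f (PySem.Dict.mk (m ++ [(c, (PySem.Dict.mk fd2).getD k 0)]))).get? f
          = some (PySem.Dict.mk (m ++ [(c, (PySem.Dict.mk fd2).getD k 0)])) :=
        PySem.Dict.get?_insert_self _ _ _
      have hm' : ∀ c' ∈ cs, c' ∉ (m ++ [(c, (PySem.Dict.mk fd2).getD k 0)]).map (·.1) := by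
        intro c' h'
        simp only [List.map_append, List.mem_append, List.map_cons, List.map_nil,
          List.mem_cons, List.not_mem_nil, or_false]
        rintro (h1 | h2)
        · exact hm c' (List.mem_cons_of_mem _ h') h1
        · exact hc (h2 ▸ h')
      rw [ih _ _ hnd' hr' hm', pvMatched_cons_some fd2 c cs k h]
      rcases hE : pvMatched fd2 cs with _ | ⟨p, ps⟩
      · simp
      · rw [if_neg (by simp), if_neg (by simp), PySem.Dict.insert_insert_self]
        simp

-- A's per-file category fold on a file results does not yet contain
theorem pvAFile_fresh (f : String) (fd2 : List (String × Int)) (cs : List String)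
    (r : PySem.Dict String (PySem.Dict String Int))
    (hnd : cs.Nodup) (hf : r.contains f = false) :
    cs.foldl (fun r c => pvAKeyLoop (fd2.map (·.1)) f (PySem.Dict.mk fd2) c r) r =
      if pvMatched fd2 cs = [] then r
      else r.insert f (PySem.Dict.mk (pvMatched fd2 cs)) := by
  induction cs generalizing r with
  | nil => simp [pvMatched]
  | cons c cs ih =>
    obtain ⟨hc, hnd'⟩ := List.nodup_cons.mp hnd
    rw [List.foldl_cons, pvAKeyLoop_eq]
    rcases h : (fd2.map (·.1)).find? (fun k => PySem.Str.lower k == PySem.Str.lower c) with _ | k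
    · simp only [h]
      rw [pvMatched_cons_none fd2 c cs h]
      exact ih r hnd' hf
    · simp only [h]
      rw [if_neg (by simp [hf])]
      have hgetD : (r.insert f PySem.Dict.empty).getD f PySem.Dict.empty = PySem.Dict.empty :=
        PySem.Dict.getD_of_get?_eq_some _ _ (PySem.Dict.get?_insert_self _ _ _)
      have hins : (PySem.Dict.empty : PySem.Dict String Int).insert c ((PySem.Dict.mk fd2).getD k 0)
          = PySem.Dict.mk [(c, (PySem.Dict.mk fd2).getD k 0)] := pvMk_insert [] _ _ (by simp)
      rw [hgetD, hins, PySem.Dict.insert_insert_self]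
      have hr' : (r.insert f (PySem.Dict.mk [(c, (PySem.Dict.mk fd2).getD k 0)])).get? f
          = some (PySem.Dict.mk [(c, (PySem.Dict.mk fd2).getD k 0)]) :=
        PySem.Dict.get?_insert_self _ _ _
      have hm' : ∀ c' ∈ cs, c' ∉ ([(c, (PySem.Dict.mk fd2).getD k 0)]).map (·.1) := by
        intro c' h'
        simp only [List.map_cons, List.map_nil, List.mem_cons, List.not_mem_nil, or_false]
        intro h1
        rw [h1] at h'
        exact hc h'
      rw [pvAFile_present f fd2 cs _ _ hnd' hr' hm', pvMatched_cons_some fd2 c cs k h]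
      rcases hE : pvMatched fd2 cs with _ | ⟨p, ps⟩
      · simp
      · rw [if_neg (by simp), if_neg (by simp), PySem.Dict.insert_insert_self]
        simp

-- the outer loops agree: A's dict of dicts, rendered to lists, is B's filtered map
theorem pvOuter (l : List (String × List (String × Int)))
    (r : PySem.Dict String (PySem.Dict String Int))
    (hnd : (l.map (·.1)).Nodup)
    (hfresh : ∀ fd ∈ l, r.contains fd.1 = false) :
    ((l.foldl
        (fun results fd =>
          pvCats.foldl
            (fun results category =>
              pvAKeyLoop (fd.2.map (·.1)) fd.1 (PySem.Dict.mk fd.2) category results)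
            results)
        r).items).map (fun p => (p.1, p.2.items)) =
      (r.items.map (fun p => (p.1, p.2.items))) ++
        ((l.filter (fun fd => !(pvMatched fd.2 pvCats).isEmpty)).map
          (fun fd => (fd.1, pvMatched fd.2 pvCats))) := by
  induction l generalizing r with
  | nil => simp
  | cons fd l ih =>
    rw [List.map_cons] at hnd
    obtain ⟨hf1, hnd'⟩ := List.nodup_cons.mp hnd
    rw [List.foldl_cons,
        pvAFile_fresh fd.1 fd.2 pvCats r pvCats_nodup (hfresh fd List.mem_cons_self)]
    rcases hE : pvMatched fd.2 pvCats with _ | ⟨p, ps⟩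
    · rw [if_pos rfl, ih r hnd' (fun fd' h' => hfresh fd' (List.mem_cons_of_mem _ h'))]
      simp [hE]
    · rw [if_neg (by simp)]
      have hfr : r.contains fd.1 = false := hfresh fd List.mem_cons_self
      have hfresh' : ∀ fd' ∈ l,
          (r.insert fd.1 (PySem.Dict.mk (p :: ps))).contains fd'.1 = false := by
        intro fd' h'
        have h1 : (fd'.1 == fd.1) = false := by
          simp only [beq_eq_false_iff_ne, ne_eq]
          intro he
          have hmem : fd'.1 ∈ l.map (·.1) := List.mem_map_of_mem h'
          rw [he] at hmem
          exact hf1 hmem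
        rw [PySem.Dict.contains_insert]
        simp only [Bool.or_eq_false_iff]
        exact ⟨h1, hfresh fd' (List.mem_cons_of_mem _ h')⟩
      rw [ih _ hnd' hfresh',
          PySem.Dict.items_insert_of_not_contains _ _ hfr]
      simp [hE]

-- ===== B-side lemmas =====

-- the category table, spelled out as the if-chain its lookups follow
theorem pvCatIndex_get? (t : String) :
    pvCatIndex.get? t =
      if "overall performance summary" == t then some 0
      else if "weekly summary" == t then some 1
      else if "daily summary" == t then some 2
      else if "overall age and gender" == t then some 3
      else if "overall hourly" == t then some 4
      else if "network summary" == t then some 5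
      else if "performance overview" == t then some 6
      else if "analytics summary" == t then some 7
      else if "dashboard data" == t then some 8
      else none := by
  rw [show pvCatIndex = PySem.Dict.mk
      [("overall performance summary", 0), ("weekly summary", 1), ("daily summary", 2),
       ("overall age and gender", 3), ("overall hourly", 4), ("network summary", 5),
       ("performance overview", 6), ("analytics summary", 7), ("dashboard data", 8)]
    from by decide]
  simp only [PySem.Dict.get?]
  split_ifs <;> simp_all [List.find?_cons_of_pos, List.find?_cons_of_neg]

-- a successful table lookup yields one of the nine positions
theorem pvCatIndex_range (t : String) (i : Int) (h : pvCatIndex.get? t = some i) :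
    i ∈ ([0, 1, 2, 3, 4, 5, 6, 7, 8] : List Int) := by
  rw [pvCatIndex_get?] at h
  split_ifs at h <;> simp_all

-- first-write-wins invariant of B's per-file pass
theorem pvFound_get?_gen (l : List (String × Int)) (d : PySem.Dict Int Int) (i : Int) :
    (l.foldl
        (fun found kv =>
          match pvCatIndex.get? (PySem.Str.lower kv.1) with
          | some j => if found.contains j then found else found.insert j kv.2
          | none => found) d).get? i =
      (d.get? i).or
        ((l.find? (fun kv => pvCatIndex.get? (PySem.Str.lower kv.1) == some i)).map (·.2)) := by
  induction l generalizing d with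
  | nil => simp
  | cons kv l ih =>
    rw [List.foldl_cons, List.find?_cons]
    rcases h : pvCatIndex.get? (PySem.Str.lower kv.1) with _ | j
    · simp only [h]
      rw [ih]
      simp
    · simp only [h]
      by_cases hj : j = i
      · subst hj
        have hp : (some j == some j) = true := by simp
        simp only [hp]
        by_cases hc : d.contains j = true
        · rw [if_pos hc, ih]
          rw [PySem.Dict.contains_eq_isSome_get?] at hc
          rcases hg : d.get? j with _ | w
          · rw [hg] at hc; cases hc
          · simp
        · rw [if_neg hc, ih, PySem.Dict.get?_insert_self]
          have hn : d.get? j = none := by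
            rw [PySem.Dict.get?_eq_none_iff_contains]; simpa using hc
          simp [hn]
      · have hp : (some j == some i) = false := by simpa using hj
        rw [hp]
        by_cases hc : d.contains j = true
        · rw [if_pos hc, ih]
        · rw [if_neg hc, ih, PySem.Dict.get?_insert_of_ne _ _ (Ne.symm hj)]

theorem pvFound_get? (l : List (String × Int)) (i : Int) :
    (pvFoundLoop l).get? i =
      (l.find? (fun kv => pvCatIndex.get? (PySem.Str.lower kv.1) == some i)).map (·.2) := by
  rw [pvFoundLoop, pvFound_get?_gen]
  simp

-- B's pass keeps its keys unique
theorem pvFound_nodup_gen (l : List (String × Int)) (d : PySem.Dict Int Int)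
    (h : d.keys.Nodup) :
    (l.foldl
        (fun found kv =>
          match pvCatIndex.get? (PySem.Str.lower kv.1) with
          | some j => if found.contains j then found else found.insert j kv.2
          | none => found) d).keys.Nodup := by
  induction l generalizing d with
  | nil => exact h
  | cons kv l ih =>
    rw [List.foldl_cons]
    rcases hg : pvCatIndex.get? (PySem.Str.lower kv.1) with _ | j
    · simp only [hg]; exact ih d h
    · simp only [hg]
      by_cases hc : d.contains j = true
      · rw [if_pos hc]; exact ih d h
      · rw [if_neg hc]; exact ih _ (PySem.Dict.nodup_keys_insert _ _ _ h)

-- a first matching pair determines the dict lookup at its key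
theorem pvFind_getD (l : List (String × Int)) (p : String → Bool) (k : String) (v : Int)
    (h : l.find? (fun kv => p kv.1) = some (k, v)) :
    (PySem.Dict.mk l).getD k 0 = v := by
  induction l with
  | nil => cases h
  | cons kv l ih =>
    rw [List.find?_cons] at h
    by_cases hq : p kv.1 = true
    · simp only [hq] at h
      obtain ⟨h1, h2⟩ := Prod.mk.injEq .. ▸ (Option.some.injEq .. ▸ h :)
      rw [PySem.Dict.getD_eq_get?_getD, PySem.Dict.get?_mk_cons]
      rw [h1]
      simp [h2]
    · simp only [hq] at h
      have hk : p k = true := by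
        have := List.find?_some h
        simpa using this
      have hne : (kv.1 == k) = false := by
        simp only [beq_eq_false_iff_ne, ne_eq]
        intro he
        rw [he, hk] at hq
        exact hq rfl
      rw [PySem.Dict.getD_eq_get?_getD, PySem.Dict.get?_mk_cons]
      simp only [hne, Bool.false_eq_true, if_false]
      rw [← PySem.Dict.getD_eq_get?_getD]
      exact ih h

-- A's key-scan of a file equals B's pair-scan, value for value
theorem pvFind_bridge (l : List (String × Int)) (p : String → Bool) :
    ((l.map (·.1)).find? p).map (fun k => (PySem.Dict.mk l).getD k 0) =
      (l.find? (fun kv => p kv.1)).map (·.2) := by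
  rw [List.find?_map]
  have hco : l.find? (p ∘ (·.1)) = l.find? (fun kv => p kv.1) := rfl
  rw [hco]
  rcases h : l.find? (fun kv => p kv.1) with _ | ⟨k, v⟩
  · simp [h]
  · simp [h, pvFind_getD l p k v h]

-- the sorted matched positions are the positions 0..8 the file contains, in order
theorem pvSortedKeys (d : PySem.Dict Int Int) (hnd : d.keys.Nodup)
    (hsub : ∀ i ∈ d.keys, i ∈ ([0, 1, 2, 3, 4, 5, 6, 7, 8] : List Int)) :
    PySem.List.sorted d.keys (fun i => i) false =
      ([0, 1, 2, 3, 4, 5, 6, 7, 8] : List Int).filter (fun i => d.contains i) := by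
  apply PySem.List.sorted_eq_of_perm_of_pairwise_lt
  · apply List.perm_of_nodup_nodup_toFinset_eq
    · exact List.Nodup.filter _ (by decide)
    · exact hnd
    · ext i
      simp only [List.mem_toFinset, List.mem_filter]
      constructor
      · rintro ⟨_, hc⟩
        exact (PySem.Dict.contains_iff_mem_keys ..).mp hc
      · intro hk
        exact ⟨hsub i hk, (PySem.Dict.contains_iff_mem_keys ..).mpr hk⟩
  · exact List.Pairwise.filter _ (by decide)

-- assembling one file's result from the found dict
theorem pvZip (d : PySem.Dict Int Int) (fd2 : List (String × Int)) (ps : List (Int × String))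
    (hget : ∀ p ∈ ps, d.get? p.1 =
      (((fd2.map (·.1)).find? (fun k => PySem.Str.lower k == PySem.Str.lower p.2)).map
        (fun k => (PySem.Dict.mk fd2).getD k 0)))
    (hc : ∀ p ∈ ps, PySem.List.pyGetD pvCats p.1 "" = p.2) :
    ((ps.map (·.1)).filter (fun i => d.contains i)).map
        (fun i => (PySem.List.pyGetD pvCats i "", d.getD i 0)) =
      pvMatched fd2 (ps.map (·.2)) := by
  induction ps with
  | nil => simp [pvMatched]
  | cons p ps ih =>
    have hgp := hget p List.mem_cons_self
    have hcp := hc p List.mem_cons_self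
    have ih' := ih (fun q hq => hget q (List.mem_cons_of_mem _ hq))
      (fun q hq => hc q (List.mem_cons_of_mem _ hq))
    rw [List.map_cons, List.map_cons, List.filter_cons]
    rcases hF : (fd2.map (·.1)).find? (fun k => PySem.Str.lower k == PySem.Str.lower p.2)
        with _ | k
    · rw [hF] at hgp
      have hcon : d.contains p.1 = false := by
        rw [PySem.Dict.contains_eq_isSome_get?, hgp]; rfl
      rw [hcon, pvMatched_cons_none fd2 p.2 _ hF]
      simpa using ih'
    · rw [hF] at hgp
      have hcon : d.contains p.1 = true := by
        rw [PySem.Dict.contains_eq_isSome_get?, hgp]; rfl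
      have hval : d.getD p.1 0 = (PySem.Dict.mk fd2).getD k 0 :=
        PySem.Dict.getD_of_get?_eq_some _ _ hgp
      rw [hcon, pvMatched_cons_some fd2 p.2 _ k hF]
      simp only [if_pos, List.map_cons, hval, hcp]
      rw [ih']


-- the nine positions, as predicates on an arbitrary lookup argument
theorem pvB0 (t : String) : (pvCatIndex.get? t == some (0 : Int)) = (t == "overall performance summary") := by
  rw [pvCatIndex_get?]
  split_ifs with h1 h2 h3 h4 h5 h6 h7 h8 h9
  case _ => rw [← eq_of_beq h1]; decide
  case _ => rw [← eq_of_beq h2]; decide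
  case _ => rw [← eq_of_beq h3]; decide
  case _ => rw [← eq_of_beq h4]; decide
  case _ => rw [← eq_of_beq h5]; decide
  case _ => rw [← eq_of_beq h6]; decide
  case _ => rw [← eq_of_beq h7]; decide
  case _ => rw [← eq_of_beq h8]; decide
  case _ => rw [← eq_of_beq h9]; decide
  case _ =>
    have hne : ¬ "overall performance summary" = t := by simpa using h1
    rw [show (t == "overall performance summary") = false from beq_eq_false_iff_ne.mpr (fun h => hne h.symm)]
    decide
theorem pvB1 (t : String) : (pvCatIndex.get? t == some (1 : Int)) = (t == "weekly summary") := by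
  rw [pvCatIndex_get?]
  split_ifs with h1 h2 h3 h4 h5 h6 h7 h8 h9
  case _ => rw [← eq_of_beq h1]; decide
  case _ => rw [← eq_of_beq h2]; decide
  case _ => rw [← eq_of_beq h3]; decide
  case _ => rw [← eq_of_beq h4]; decide
  case _ => rw [← eq_of_beq h5]; decide
  case _ => rw [← eq_of_beq h6]; decide
  case _ => rw [← eq_of_beq h7]; decide
  case _ => rw [← eq_of_beq h8]; decide
  case _ => rw [← eq_of_beq h9]; decide
  case _ =>
    have hne : ¬ "weekly summary" = t := by simpa using h2
    rw [show (t == "weekly summary") = false from beq_eq_false_iff_ne.mpr (fun h => hne h.symm)]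
    decide
theorem pvB2 (t : String) : (pvCatIndex.get? t == some (2 : Int)) = (t == "daily summary") := by
  rw [pvCatIndex_get?]
  split_ifs with h1 h2 h3 h4 h5 h6 h7 h8 h9
  case _ => rw [← eq_of_beq h1]; decide
  case _ => rw [← eq_of_beq h2]; decide
  case _ => rw [← eq_of_beq h3]; decide
  case _ => rw [← eq_of_beq h4]; decide
  case _ => rw [← eq_of_beq h5]; decide
  case _ => rw [← eq_of_beq h6]; decide
  case _ => rw [← eq_of_beq h7]; decide
  case _ => rw [← eq_of_beq h8]; decide
  case _ => rw [← eq_of_beq h9]; decide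
  case _ =>
    have hne : ¬ "daily summary" = t := by simpa using h3
    rw [show (t == "daily summary") = false from beq_eq_false_iff_ne.mpr (fun h => hne h.symm)]
    decide
theorem pvB3 (t : String) : (pvCatIndex.get? t == some (3 : Int)) = (t == "overall age and gender") := by
  rw [pvCatIndex_get?]
  split_ifs with h1 h2 h3 h4 h5 h6 h7 h8 h9
  case _ => rw [← eq_of_beq h1]; decide
  case _ => rw [← eq_of_beq h2]; decide
  case _ => rw [← eq_of_beq h3]; decide
  case _ => rw [← eq_of_beq h4]; decide
  case _ => rw [← eq_of_beq h5]; decide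
  case _ => rw [← eq_of_beq h6]; decide
  case _ => rw [← eq_of_beq h7]; decide
  case _ => rw [← eq_of_beq h8]; decide
  case _ => rw [← eq_of_beq h9]; decide
  case _ =>
    have hne : ¬ "overall age and gender" = t := by simpa using h4
    rw [show (t == "overall age and gender") = false from beq_eq_false_iff_ne.mpr (fun h => hne h.symm)]
    decide
theorem pvB4 (t : String) : (pvCatIndex.get? t == some (4 : Int)) = (t == "overall hourly") := by
  rw [pvCatIndex_get?]
  split_ifs with h1 h2 h3 h4 h5 h6 h7 h8 h9
  case _ => rw [← eq_of_beq h1]; decide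
  case _ => rw [← eq_of_beq h2]; decide
  case _ => rw [← eq_of_beq h3]; decide
  case _ => rw [← eq_of_beq h4]; decide
  case _ => rw [← eq_of_beq h5]; decide
  case _ => rw [← eq_of_beq h6]; decide
  case _ => rw [← eq_of_beq h7]; decide
  case _ => rw [← eq_of_beq h8]; decide
  case _ => rw [← eq_of_beq h9]; decide
  case _ =>
    have hne : ¬ "overall hourly" = t := by simpa using h5
    rw [show (t == "overall hourly") = false from beq_eq_false_iff_ne.mpr (fun h => hne h.symm)]
    decide
theorem pvB5 (t : String) : (pvCatIndex.get? t == some (5 : Int)) = (t == "network summary") := by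
  rw [pvCatIndex_get?]
  split_ifs with h1 h2 h3 h4 h5 h6 h7 h8 h9
  case _ => rw [← eq_of_beq h1]; decide
  case _ => rw [← eq_of_beq h2]; decide
  case _ => rw [← eq_of_beq h3]; decide
  case _ => rw [← eq_of_beq h4]; decide
  case _ => rw [← eq_of_beq h5]; decide
  case _ => rw [← eq_of_beq h6]; decide
  case _ => rw [← eq_of_beq h7]; decide
  case _ => rw [← eq_of_beq h8]; decide
  case _ => rw [← eq_of_beq h9]; decide
  case _ =>
    have hne : ¬ "network summary" = t := by simpa using h6
    rw [show (t == "network summary") = false from beq_eq_false_iff_ne.mpr (fun h => hne h.symm)]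
    decide
theorem pvB6 (t : String) : (pvCatIndex.get? t == some (6 : Int)) = (t == "performance overview") := by
  rw [pvCatIndex_get?]
  split_ifs with h1 h2 h3 h4 h5 h6 h7 h8 h9
  case _ => rw [← eq_of_beq h1]; decide
  case _ => rw [← eq_of_beq h2]; decide
  case _ => rw [← eq_of_beq h3]; decide
  case _ => rw [← eq_of_beq h4]; decide
  case _ => rw [← eq_of_beq h5]; decide
  case _ => rw [← eq_of_beq h6]; decide
  case _ => rw [← eq_of_beq h7]; decide
  case _ => rw [← eq_of_beq h8]; decide
  case _ => rw [← eq_of_beq h9]; decide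
  case _ =>
    have hne : ¬ "performance overview" = t := by simpa using h7
    rw [show (t == "performance overview") = false from beq_eq_false_iff_ne.mpr (fun h => hne h.symm)]
    decide
theorem pvB7 (t : String) : (pvCatIndex.get? t == some (7 : Int)) = (t == "analytics summary") := by
  rw [pvCatIndex_get?]
  split_ifs with h1 h2 h3 h4 h5 h6 h7 h8 h9
  case _ => rw [← eq_of_beq h1]; decide
  case _ => rw [← eq_of_beq h2]; decide
  case _ => rw [← eq_of_beq h3]; decide
  case _ => rw [← eq_of_beq h4]; decide
  case _ => rw [← eq_of_beq h5]; decide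
  case _ => rw [← eq_of_beq h6]; decide
  case _ => rw [← eq_of_beq h7]; decide
  case _ => rw [← eq_of_beq h8]; decide
  case _ => rw [← eq_of_beq h9]; decide
  case _ =>
    have hne : ¬ "analytics summary" = t := by simpa using h8
    rw [show (t == "analytics summary") = false from beq_eq_false_iff_ne.mpr (fun h => hne h.symm)]
    decide
theorem pvB8 (t : String) : (pvCatIndex.get? t == some (8 : Int)) = (t == "dashboard data") := by
  rw [pvCatIndex_get?]
  split_ifs with h1 h2 h3 h4 h5 h6 h7 h8 h9
  case _ => rw [← eq_of_beq h1]; decide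
  case _ => rw [← eq_of_beq h2]; decide
  case _ => rw [← eq_of_beq h3]; decide
  case _ => rw [← eq_of_beq h4]; decide
  case _ => rw [← eq_of_beq h5]; decide
  case _ => rw [← eq_of_beq h6]; decide
  case _ => rw [← eq_of_beq h7]; decide
  case _ => rw [← eq_of_beq h8]; decide
  case _ => rw [← eq_of_beq h9]; decide
  case _ =>
    have hne : ¬ "dashboard data" = t := by simpa using h9
    rw [show (t == "dashboard data") = false from beq_eq_false_iff_ne.mpr (fun h => hne h.symm)]
    decide

-- B's found dict, read through A's first-matching-key scan, pair by pair
set_option maxRecDepth 8192 in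
theorem pvFound_get?_A (fd2 : List (String × Int)) (p : Int × String)
    (hp : p ∈ ([((0 : Int), "Overall Performance Summary"), (1, "Weekly Summary"),
      (2, "Daily Summary"), (3, "Overall Age and Gender"), (4, "Overall Hourly"),
      (5, "Network Summary"), (6, "Performance Overview"), (7, "Analytics Summary"),
      (8, "Dashboard Data")] : List (Int × String))) :
    (pvFoundLoop fd2).get? p.1 =
      (((fd2.map (·.1)).find? (fun k => PySem.Str.lower k == PySem.Str.lower p.2)).map
        (fun k => (PySem.Dict.mk fd2).getD k 0)) := by
  rw [pvFound_get?, pvFind_bridge]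
  fin_cases hp
  · have hfun : (fun (kv : String × Int) => pvCatIndex.get? (PySem.Str.lower kv.1) == some (0 : Int)) =
        (fun kv => PySem.Str.lower kv.1 == PySem.Str.lower "Overall Performance Summary") := by
      funext kv
      rw [pvB0, show PySem.Str.lower "Overall Performance Summary" = "overall performance summary" from by decide]
    rw [hfun]
  · have hfun : (fun (kv : String × Int) => pvCatIndex.get? (PySem.Str.lower kv.1) == some (1 : Int)) =
        (fun kv => PySem.Str.lower kv.1 == PySem.Str.lower "Weekly Summary") := by
      funext kv
      rw [pvB1, show PySem.Str.lower "Weekly Summary" = "weekly summary" from by decide]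
    rw [hfun]
  · have hfun : (fun (kv : String × Int) => pvCatIndex.get? (PySem.Str.lower kv.1) == some (2 : Int)) =
        (fun kv => PySem.Str.lower kv.1 == PySem.Str.lower "Daily Summary") := by
      funext kv
      rw [pvB2, show PySem.Str.lower "Daily Summary" = "daily summary" from by decide]
    rw [hfun]
  · have hfun : (fun (kv : String × Int) => pvCatIndex.get? (PySem.Str.lower kv.1) == some (3 : Int)) =
        (fun kv => PySem.Str.lower kv.1 == PySem.Str.lower "Overall Age and Gender") := by
      funext kv
      rw [pvB3, show PySem.Str.lower "Overall Age and Gender" = "overall age and gender" from by decide]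
    rw [hfun]
  · have hfun : (fun (kv : String × Int) => pvCatIndex.get? (PySem.Str.lower kv.1) == some (4 : Int)) =
        (fun kv => PySem.Str.lower kv.1 == PySem.Str.lower "Overall Hourly") := by
      funext kv
      rw [pvB4, show PySem.Str.lower "Overall Hourly" = "overall hourly" from by decide]
    rw [hfun]
  · have hfun : (fun (kv : String × Int) => pvCatIndex.get? (PySem.Str.lower kv.1) == some (5 : Int)) =
        (fun kv => PySem.Str.lower kv.1 == PySem.Str.lower "Network Summary") := by
      funext kv
      rw [pvB5, show PySem.Str.lower "Network Summary" = "network summary" from by decide]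
    rw [hfun]
  · have hfun : (fun (kv : String × Int) => pvCatIndex.get? (PySem.Str.lower kv.1) == some (6 : Int)) =
        (fun kv => PySem.Str.lower kv.1 == PySem.Str.lower "Performance Overview") := by
      funext kv
      rw [pvB6, show PySem.Str.lower "Performance Overview" = "performance overview" from by decide]
    rw [hfun]
  · have hfun : (fun (kv : String × Int) => pvCatIndex.get? (PySem.Str.lower kv.1) == some (7 : Int)) =
        (fun kv => PySem.Str.lower kv.1 == PySem.Str.lower "Analytics Summary") := by
      funext kv
      rw [pvB7, show PySem.Str.lower "Analytics Summary" = "analytics summary" from by decide]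
    rw [hfun]
  · have hfun : (fun (kv : String × Int) => pvCatIndex.get? (PySem.Str.lower kv.1) == some (8 : Int)) =
        (fun kv => PySem.Str.lower kv.1 == PySem.Str.lower "Dashboard Data") := by
      funext kv
      rw [pvB8, show PySem.Str.lower "Dashboard Data" = "dashboard data" from by decide]
    rw [hfun]

-- one file's rebuilt result is exactly its match list
theorem pvBFile_list (fd2 : List (String × Int)) :
    (PySem.List.sorted (pvFoundLoop fd2).keys (fun i => i) false).map
        (fun i => (PySem.List.pyGetD pvCats i "", (pvFoundLoop fd2).getD i 0)) =
      pvMatched fd2 pvCats := by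
  have hnd : (pvFoundLoop fd2).keys.Nodup :=
    pvFound_nodup_gen fd2 PySem.Dict.empty (by simp)
  have hsub : ∀ i ∈ (pvFoundLoop fd2).keys, i ∈ ([0, 1, 2, 3, 4, 5, 6, 7, 8] : List Int) := by
    intro i hk
    have hc : (pvFoundLoop fd2).contains i = true :=
      (PySem.Dict.contains_iff_mem_keys ..).mpr hk
    rw [PySem.Dict.contains_eq_isSome_get?, pvFound_get?] at hc
    rcases hF : fd2.find? (fun kv => pvCatIndex.get? (PySem.Str.lower kv.1) == some i)
        with _ | kv
    · rw [hF] at hc; cases hc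
    · have hpred := List.find?_some hF
      simp only [beq_iff_eq] at hpred
      exact pvCatIndex_range _ i hpred
  rw [pvSortedKeys _ hnd hsub]
  have hz := pvZip (pvFoundLoop fd2) fd2
    [((0 : Int), "Overall Performance Summary"), (1, "Weekly Summary"),
     (2, "Daily Summary"), (3, "Overall Age and Gender"), (4, "Overall Hourly"),
     (5, "Network Summary"), (6, "Performance Overview"), (7, "Analytics Summary"),
     (8, "Dashboard Data")]
    (fun p hp => pvFound_get?_A fd2 p hp)
    (by decide)
  simpa using hz

-- the 'if found:' guard agrees with the match list being empty
theorem pvBFile_empty (fd2 : List (String × Int)) :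
    (pvFoundLoop fd2).items.isEmpty = (pvMatched fd2 pvCats).isEmpty := by
  have hlen : (pvMatched fd2 pvCats).length = (pvFoundLoop fd2).items.length := by
    rw [← pvBFile_list]
    simp [PySem.List.length_sorted, PySem.Dict.keys]
  rw [Bool.eq_iff_iff, List.isEmpty_iff_length_eq_zero, List.isEmpty_iff_length_eq_zero, hlen]

-- ===== VERDICT (by name: the statement is the Claim_ definition above) =====
theorem get_summary_categories_spec : Claim_equal_get_summary_categories := by
  intro jd _hDom hPre
  unfold Spec_get_summary_categories get_summary_categories get_summary_categories_alt
  have hA := pvOuter jd PySem.Dict.empty hPre (fun fd _ => by simp)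
  rw [hA]
  have hstep : (fun (results : List (String × List (String × Int)))
      (fd : String × List (String × Int)) =>
        let found := pvFoundLoop fd.2
        if found.items.isEmpty then results
        else results ++ [(fd.1,
          (PySem.List.sorted found.keys (fun i => i) false).map
            (fun i => (PySem.List.pyGetD pvCats i "", found.getD i 0)))]) =
      (fun results fd =>
        if (!(pvMatched fd.2 pvCats).isEmpty) = true
        then results ++ [(fd.1, pvMatched fd.2 pvCats)] else results) := by
    funext results fd
    simp only [pvBFile_empty, pvBFile_list]
    cases h : (pvMatched fd.2 pvCats).isEmpty <;> simp
  rw [hstep, PySem.List.foldl_append_if]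
  simp [PySem.Dict.empty]
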